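-- pv_equiv track=rewrite | github.com/wisper12933/GA-Rollback | test_webshop/web_reflexion_ssr.py | split_analysis
-- ===== SOURCE A (Python) =====
-- def split_analysis(text):
--     lines = text.split('\n')
--     content = []
--     for line in lines:
--         if line.startswith('** Error Location'):
--             loc = line[2:].strip()
--             content.append(loc)
--             break
--
--     for line in lines:
--         if line.startswith('** Explanation'):
--             anal = line[2:].strip()
--             content.append(anal)
--             break
--
--     return content
-- ===== SOURCE B (Python) =====
-- def split_analysis(text):
--     loc = None
--     anal = None
--     for line in text.split('\n'):
--         if loc is None and line.startswith('** Error Location'):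
--             loc = line[2:].strip()
--         if anal is None and line.startswith('** Explanation'):
--             anal = line[2:].strip()
--     content = []
--     if loc is not None:
--         content.append(loc)
--     if anal is not None:
--         content.append(anal)
--     return content
-- ===== Notes on version B (the rewrite author's own statement) =====
-- stated objective: alternative
-- what changed: Replaces A's two independent break-early scans over the lines with a single pass maintaining loc/anal option variables (first-match kept via is-None guards), assembling the result in fixed loc-then-anal order after the loop.
import Mathlib
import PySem

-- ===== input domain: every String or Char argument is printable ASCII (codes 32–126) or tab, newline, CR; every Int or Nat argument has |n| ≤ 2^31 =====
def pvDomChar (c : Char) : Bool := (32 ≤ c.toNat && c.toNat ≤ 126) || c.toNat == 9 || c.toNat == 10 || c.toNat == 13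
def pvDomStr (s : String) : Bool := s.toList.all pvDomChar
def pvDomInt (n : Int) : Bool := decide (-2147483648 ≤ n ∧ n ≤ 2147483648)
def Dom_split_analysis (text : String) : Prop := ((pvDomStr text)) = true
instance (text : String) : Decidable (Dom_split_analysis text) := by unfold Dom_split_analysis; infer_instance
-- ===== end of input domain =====

-- B replaces A's two break-early scans with one pass keeping loc/anal options, then a fixed-order assembly (alternative decomposition, same cost).

-- ===== PORT A =====
-- first loop of A: scan for '** Error Location', append stripped line[2:] and break
def pvLoopLocA (ls : List String) (content : List String) : List String :=
  match ls with
  | [] => content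
  | l :: rest =>
    if PySem.Str.startswith l "** Error Location" then
      content ++ [PySem.Str.strip (PySem.Str.slice l (some 2) none)]
    else pvLoopLocA rest content

-- second loop of A: scan for '** Explanation', append stripped line[2:] and break
def pvLoopExpA (ls : List String) (content : List String) : List String :=
  match ls with
  | [] => content
  | l :: rest =>
    if PySem.Str.startswith l "** Explanation" then
      content ++ [PySem.Str.strip (PySem.Str.slice l (some 2) none)]
    else pvLoopExpA rest content

def split_analysis (text : String) : List String :=
  let lines := (PySem.Str.split? text "\n").getD []
  let content : List String := []
  let content := pvLoopLocA lines content
  let content := pvLoopExpA lines content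
  content

-- ===== PORT B =====
-- single pass: update loc/anal with is-None guards
def pvLoopB (ls : List String) (loc anal : Option String) : Option String × Option String :=
  match ls with
  | [] => (loc, anal)
  | l :: rest =>
    let loc := if loc.isNone && PySem.Str.startswith l "** Error Location" then
      some (PySem.Str.strip (PySem.Str.slice l (some 2) none)) else loc
    let anal := if anal.isNone && PySem.Str.startswith l "** Explanation" then
      some (PySem.Str.strip (PySem.Str.slice l (some 2) none)) else anal
    pvLoopB rest loc anal

def split_analysis_alt (text : String) : List String :=
  let (loc, anal) := pvLoopB ((PySem.Str.split? text "\n").getD []) none none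
  let content : List String := []
  let content := match loc with | some x => content ++ [x] | none => content
  let content := match anal with | some x => content ++ [x] | none => content
  content

-- ===== PRECONDITION & SPEC =====
def Spec_split_analysis (text : String) (out : List String) : Prop := out = split_analysis_alt text
instance (text : String) (out : List String) : Decidable (Spec_split_analysis text out) := by unfold Spec_split_analysis; infer_instance

-- ===== CLAIM (what is proved, stated in full; the proofs are below) =====
def Claim_equal_split_analysis : Prop := ∀ (text : String), Dom_split_analysis text → Spec_split_analysis text (split_analysis text)

-- ===== LEMMAS AND PROOFS =====

-- the first match (stripped line[2:]) of a prefix p in ls, as an Option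
def pvFirst (p : String) (ls : List String) : Option String :=
  match ls with
  | [] => none
  | l :: rest =>
    if PySem.Str.startswith l p then some (PySem.Str.strip (PySem.Str.slice l (some 2) none))
    else pvFirst p rest

theorem pvLoopLocA_eq (ls content) :
    pvLoopLocA ls content = content ++ (pvFirst "** Error Location" ls).toList := by
  induction ls with
  | nil => simp [pvLoopLocA, pvFirst]
  | cons l rest ih => simp [pvLoopLocA, pvFirst]; split <;> simp [ih]

theorem pvLoopExpA_eq (ls content) :
    pvLoopExpA ls content = content ++ (pvFirst "** Explanation" ls).toList := by
  induction ls with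
  | nil => simp [pvLoopExpA, pvFirst]
  | cons l rest ih => simp [pvLoopExpA, pvFirst]; split <;> simp [ih]

theorem pvLoopB_eq (ls : List String) (loc anal : Option String) :
    pvLoopB ls loc anal =
      (loc.or (pvFirst "** Error Location" ls), anal.or (pvFirst "** Explanation" ls)) := by
  induction ls generalizing loc anal with
  | nil => simp [pvLoopB, pvFirst]
  | cons l rest ih =>
    simp only [pvLoopB, pvFirst, ih]
    cases loc <;> cases anal <;> simp <;> split_ifs <;> simp [Option.or]

-- ===== VERDICT (by name: the statement is the Claim_ definition above) =====
theorem split_analysis_spec : Claim_equal_split_analysis := by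
  intro text _
  unfold Spec_split_analysis split_analysis split_analysis_alt
  simp only [pvLoopB_eq, pvLoopLocA_eq, pvLoopExpA_eq]
  cases pvFirst "** Error Location" ((PySem.Str.split? text "\n").getD []) <;>
    cases pvFirst "** Explanation" ((PySem.Str.split? text "\n").getD []) <;> simp
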